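-- pv_equiv track=rewrite | github.com/En0526/trading_system | news_analysis/news_fetcher.py | extract_companies_from_text
-- ===== SOURCE A (Python) =====
-- from typing import Dict, List, Optional
--
-- def extract_companies_from_text(text: str, company_list: Dict[str, str]) -> List[str]:
--     """
--     從文本中提取公司名稱
--
--     Args:
--         text: 文本內容
--         company_list: 公司名稱字典 {symbol: name}
--
--     Returns:
--         出現的公司代碼列表
--     """
--     found_companies = []
--     text_lower = text.lower()
--
--     for symbol, name in company_list.items():
--         # 檢查公司名稱
--         if name.lower() in text_lower:
--             found_companies.append(symbol)
--         # 檢查股票代碼（移除 .TW 等後綴）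
--         symbol_base = symbol.split('.')[0]
--         if symbol_base in text_lower:
--             found_companies.append(symbol)
--
--     return list(set(found_companies))  # 去重
-- ===== SOURCE B (Python) =====
-- def extract_companies_from_text(text, company_list):
--     """Position-scan multi-pattern matcher: index patterns by first character,
--     scan the text once, then emit symbols whose name/base pattern was found."""
--     text_lower = text.lower()
--     by_first = {}
--     for symbol, name in company_list.items():
--         for p in (name.lower(), symbol.split('.')[0]):
--             if p:
--                 by_first.setdefault(p[0], []).append(p)
--     found = set()
--     for i, c in enumerate(text_lower):
--         for p in by_first.get(c, ()):
--             if text_lower.startswith(p, i):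
--                 found.add(p)
--
--     def hit(p):
--         return p == "" or p in found
--
--     return [symbol for symbol, name in company_list.items()
--             if hit(name.lower()) or hit(symbol.split('.')[0])]
-- ===== Notes on version B (the rewrite author's own statement) =====
-- stated objective: alternative
-- what changed: B replaces A's per-pattern full-text substring tests ('pattern in text') by one left-to-right scan of the text against a first-character index of all name/symbol-base patterns, collecting matched patterns in a set and emitting matching symbols in one filtered pass without a final dedup; it trades CPython's C-speed substring primitive for an explicit multi-pattern scan, so it is not measurably faster in Python.
import Mathlib
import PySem

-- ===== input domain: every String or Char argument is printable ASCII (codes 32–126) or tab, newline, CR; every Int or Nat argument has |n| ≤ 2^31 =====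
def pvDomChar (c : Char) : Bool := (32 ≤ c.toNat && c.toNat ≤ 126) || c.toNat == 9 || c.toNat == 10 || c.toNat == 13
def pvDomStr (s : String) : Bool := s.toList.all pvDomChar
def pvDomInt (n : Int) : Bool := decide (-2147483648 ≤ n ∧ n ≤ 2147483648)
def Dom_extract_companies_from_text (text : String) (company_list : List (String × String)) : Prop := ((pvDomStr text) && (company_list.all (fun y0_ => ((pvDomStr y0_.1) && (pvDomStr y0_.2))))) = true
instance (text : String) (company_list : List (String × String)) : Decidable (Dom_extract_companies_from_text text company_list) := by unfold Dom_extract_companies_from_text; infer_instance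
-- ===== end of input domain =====

-- B replaces A's per-pattern substring scans by one left-to-right scan of the text against a
-- first-character index of all patterns (a simple multi-pattern matcher); equivalence is proved
-- on association lists with pairwise-distinct keys (the shape a Python dict can have).
-- A's `list(set(...))` hash order is not modelled: both ports return the distinct matching
-- symbols in first-occurrence order (the return value is compared as a set).

-- ===== PORT A =====
-- symbol.split('.')[0] — split? with a nonempty separator always returns `some` of a nonempty
-- list, so the getD/headD defaults are never used (exact).
def pvBase (symbol : String) : String := ((PySem.Str.split? symbol ".").getD []).headD ""

def extract_companies_from_text (text : String) (company_list : List (String × String)) : List String :=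
  let text_lower := PySem.Str.lower text
  let found_companies := company_list.foldl (fun acc sn =>
    let acc := if PySem.Str.isIn (PySem.Str.lower sn.2) text_lower then acc ++ [sn.1] else acc
    if PySem.Str.isIn (pvBase sn.1) text_lower then acc ++ [sn.1] else acc) []
  PySem.Set.ofList found_companies

-- ===== PORT B =====
-- by_first.setdefault(p[0], []).append(p)  (skipping empty patterns)
def pvAddPat (d : PySem.Dict Char (List (List Char))) (p : List Char) : PySem.Dict Char (List (List Char)) :=
  match p with
  | [] => d
  | c :: _ => d.modify c [] (fun l => l ++ [p])

def pvByFirst (company_list : List (String × String)) : PySem.Dict Char (List (List Char)) :=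
  company_list.foldl (fun d sn =>
    pvAddPat (pvAddPat d (PySem.Chars.lower sn.2.toList)) (pvBase sn.1).toList) PySem.Dict.empty

-- the scan: for i, c in enumerate(text_lower): for p in by_first.get(c, ()): if text_lower.startswith(p, i): found.add(p)
-- text_lower.startswith(p, i) with 0 ≤ i ≤ len — exactly startswith on the drop (enumerate indices are ≥ 0)
def pvFound (tl : List Char) (d : PySem.Dict Char (List (List Char))) : PySem.Set (List Char) :=
  (PySem.List.enumerate tl).foldl (fun fd ic =>
    (d.getD ic.2 []).foldl (fun fd p =>
      if PySem.Chars.startswith (tl.drop ic.1.toNat) p then PySem.Set.add fd p else fd) fd) []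

def pvHit (found : PySem.Set (List Char)) (p : List Char) : Bool :=
  p == [] || found.contains p

def extract_companies_from_text_alt (text : String) (company_list : List (String × String)) : List String :=
  let tl := (PySem.Str.lower text).toList
  let found := pvFound tl (pvByFirst company_list)
  company_list.foldl (fun acc sn =>
    if pvHit found (PySem.Chars.lower sn.2.toList) || pvHit found (pvBase sn.1).toList
    then acc ++ [sn.1] else acc) []

-- ===== PRECONDITION & SPEC =====
-- Pre_ excludes only association lists with duplicate keys: A's parameter is a Python dict
-- {symbol: name}, which cannot hold two entries with the same symbol, so such lists correspond
-- to no input of A.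
def Pre_extract_companies_from_text (text : String) (company_list : List (String × String)) : Prop :=
  (company_list.map Prod.fst).Nodup
instance (text : String) (company_list : List (String × String)) : Decidable (Pre_extract_companies_from_text text company_list) := by unfold Pre_extract_companies_from_text; infer_instance

def pvWitness_extract_companies_from_text : String × (List (String × String)) :=
  ("tsmc rallied while 2317 fell", [("2330.TW", "TSMC"), ("2317.TW", "Foxconn"), ("AAPL", "Apple")])

def Spec_extract_companies_from_text (text : String) (company_list : List (String × String)) (out : List String) : Prop := out = extract_companies_from_text_alt text company_list
instance (text : String) (company_list : List (String × String)) (out : List String) : Decidable (Spec_extract_companies_from_text text company_list out) := by unfold Spec_extract_companies_from_text; infer_instance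

-- ===== CLAIM (what is proved, stated in full; the proofs are below) =====
def Claim_equal_extract_companies_from_text : Prop := ∀ (text : String) (company_list : List (String × String)), Dom_extract_companies_from_text text company_list → Pre_extract_companies_from_text text company_list → Spec_extract_companies_from_text text company_list (extract_companies_from_text text company_list)

-- ===== LEMMAS AND PROOFS =====

-- all patterns contributed by the company list (empty ones included)
def pvPats (company_list : List (String × String)) : List (List Char) :=
  company_list.flatMap (fun sn => [PySem.Chars.lower sn.2.toList, (pvBase sn.1).toList])

theorem pv_inner_mem (cond : List Char → Bool) (ps : List (List Char)) (fd : PySem.Set (List Char)) (x : List Char) :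
    x ∈ ps.foldl (fun fd p => if cond p then PySem.Set.add fd p else fd) fd ↔
      x ∈ fd ∨ (x ∈ ps ∧ cond x) := by
  induction ps generalizing fd with
  | nil => simp
  | cons p t ih =>
    simp only [List.foldl_cons, ih]
    by_cases h : cond p <;> simp [h, PySem.Set.mem_add] <;> aesop

theorem pv_outer_mem (tl : List Char) (d : PySem.Dict Char (List (List Char)))
    (L : List (Int × Char)) (fd : PySem.Set (List Char)) (x : List Char) :
    x ∈ L.foldl (fun fd ic =>
        (d.getD ic.2 []).foldl (fun fd p =>
          if PySem.Chars.startswith (tl.drop ic.1.toNat) p then PySem.Set.add fd p else fd) fd) fd ↔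
      x ∈ fd ∨ ∃ ic ∈ L, x ∈ d.getD ic.2 [] ∧ PySem.Chars.startswith (tl.drop ic.1.toNat) x := by
  induction L generalizing fd with
  | nil => simp
  | cons a t ih =>
    simp only [List.foldl_cons, ih, pv_inner_mem]
    aesop

theorem pv_found_mem (tl : List Char) (d : PySem.Dict Char (List (List Char))) (x : List Char) :
    x ∈ pvFound tl d ↔
      ∃ i c, (i, c) ∈ PySem.List.enumerate tl ∧ x ∈ d.getD c [] ∧
        PySem.Chars.startswith (tl.drop i.toNat) x := by
  unfold pvFound
  rw [pv_outer_mem]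
  aesop

theorem pv_mem_enumerate (tl : List Char) (i : Int) (c : Char) :
    (i, c) ∈ PySem.List.enumerate tl ↔ ∃ k : Nat, tl[k]? = some c ∧ i = (k : Int) := by
  constructor
  · intro h
    rcases List.mem_iff_getElem?.1 h with ⟨k, hk⟩
    rw [PySem.List.getElem?_enumerate] at hk
    rcases Option.map_eq_some_iff.1 hk with ⟨x, hx, he⟩
    exact ⟨k, by simp_all, by simp_all⟩
  · rintro ⟨k, hk, rfl⟩
    refine List.mem_iff_getElem?.2 ⟨k, ?_⟩
    rw [PySem.List.getElem?_enumerate, hk]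
    simp

theorem pv_addPat_getD (d : PySem.Dict Char (List (List Char))) (p : List Char) (c : Char) :
    (pvAddPat d p).getD c [] = d.getD c [] ++ (if p.head? == some c then [p] else []) := by
  match p with
  | [] => simp [pvAddPat]
  | a :: t =>
    by_cases h : a = c
    · subst h; simp [pvAddPat, PySem.Dict.getD_modify_self]
    · simp [pvAddPat, PySem.Dict.getD_modify_of_ne d [] _ (Ne.symm h), h]

theorem pv_byFirst_getD (company_list : List (String × String)) (c : Char) :
    (pvByFirst company_list).getD c [] =
      (pvPats company_list).filter (fun p => p.head? == some c) := by
  have key : ∀ (cl : List (String × String)) (d : PySem.Dict Char (List (List Char))),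
      (cl.foldl (fun d sn =>
        pvAddPat (pvAddPat d (PySem.Chars.lower sn.2.toList)) (pvBase sn.1).toList) d).getD c [] =
      d.getD c [] ++ (pvPats cl).filter (fun p => p.head? == some c) := by
    intro cl
    induction cl with
    | nil => simp [pvPats]
    | cons sn t ih =>
      intro d
      simp only [List.foldl_cons, ih, pv_addPat_getD, pvPats, List.flatMap_cons, List.filter_append]
      simp only [List.filter_cons, List.append_assoc]
      split_ifs <;> simp_all
  have he : (PySem.Dict.empty : PySem.Dict Char (List (List Char))).getD c [] = [] := rfl
  simpa [pvByFirst, he] using key company_list PySem.Dict.empty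

theorem pv_infix_decomp (x tl : List Char) (hx : x ≠ []) :
    x <:+: tl ↔ ∃ i : Nat, i < tl.length ∧ x <+: tl.drop i := by
  constructor
  · intro h
    rcases List.infix_iff_prefix_suffix.1 h with ⟨t, hp, hs⟩
    refine ⟨tl.length - t.length, ?_, ?_⟩
    · have ht : t ≠ [] := by rintro rfl; exact hx (List.prefix_nil.1 hp)
      have := hs.length_le
      have : 1 ≤ t.length := List.length_pos_iff.2 ht
      omega
    · rwa [← List.suffix_iff_eq_drop.1 hs]
  · rintro ⟨i, _, hp⟩
    exact List.infix_iff_prefix_suffix.2 ⟨tl.drop i, hp, List.drop_suffix i tl⟩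

theorem pv_found_iff (tl : List Char) (company_list : List (String × String)) (x : List Char) :
    x ∈ pvFound tl (pvByFirst company_list) ↔
      x ∈ pvPats company_list ∧ x ≠ [] ∧ x <:+: tl := by
  rw [pv_found_mem]
  constructor
  · rintro ⟨i, c, hmem, hx, hsw⟩
    rw [pv_byFirst_getD] at hx
    have hx' := List.mem_filter.1 hx
    have hhead : x.head? = some c := by simpa using hx'.2
    have hxne : x ≠ [] := by rintro rfl; simp at hhead
    rcases (pv_mem_enumerate tl i c).1 hmem with ⟨k, hk, rfl⟩
    refine ⟨hx'.1, hxne, ?_⟩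
    exact (pv_infix_decomp x tl hxne).2 ⟨k, by
      have := List.getElem?_eq_some_iff.1 hk
      exact ⟨this.choose, by simpa using (PySem.Chars.startswith_iff _ _).1 hsw⟩⟩
  · rintro ⟨hpat, hxne, hinf⟩
    rcases (pv_infix_decomp x tl hxne).1 hinf with ⟨k, hk, hpre⟩
    have hc : tl[k]? = x.head? := by
      rw [← List.head?_drop]
      rcases hpre with ⟨t, ht⟩
      rw [← ht]
      cases x with
      | nil => exact absurd rfl hxne
      | cons a s => simp
    obtain ⟨a, s, rfl⟩ : ∃ a s, x = a :: s := by
      cases x with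
      | nil => exact absurd rfl hxne
      | cons a s => exact ⟨a, s, rfl⟩
    refine ⟨(k : Int), a, (pv_mem_enumerate tl _ a).2 ⟨k, by simpa using hc, rfl⟩, ?_, ?_⟩
    · rw [pv_byFirst_getD]
      exact List.mem_filter.2 ⟨hpat, by simp⟩
    · simpa using (PySem.Chars.startswith_iff _ _).2 hpre

-- dedup of per-company blocks = one filtered pass, given pairwise-distinct symbols
theorem pv_ofList_blocks (c1 c2 : (String × String) → Bool)
    (cl : List (String × String)) (acc : List String)
    (hnd : (cl.map Prod.fst).Nodup) (hacc : ∀ sn ∈ cl, sn.1 ∉ acc) :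
    (cl.flatMap (fun sn => (if c1 sn then [sn.1] else []) ++ (if c2 sn then [sn.1] else []))).foldl
        PySem.Set.add acc =
      acc ++ (cl.filter (fun sn => c1 sn || c2 sn)).map Prod.fst := by
  induction cl generalizing acc with
  | nil => simp
  | cons sn t ih =>
    simp only [List.map_cons, List.nodup_cons] at hnd
    have hsn : sn.1 ∉ acc := hacc sn (List.mem_cons_self ..)
    have hadd : ∀ a : List String, sn.1 ∉ a → PySem.Set.add a sn.1 = a ++ [sn.1] := by
      intro a ha
      simp [PySem.Set.add, PySem.Set.contains]
      intro h
      exact absurd h ha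
    have hadd2 : PySem.Set.add (acc ++ [sn.1]) sn.1 = acc ++ [sn.1] := by
      simp [PySem.Set.add, PySem.Set.contains]
    have hrest : ∀ x ∈ t, x.1 ∉ acc ++ [sn.1] := by
      intro x hx
      simp only [List.mem_append, List.mem_singleton, not_or]
      refine ⟨hacc x (List.mem_cons_of_mem _ hx), ?_⟩
      intro h
      exact hnd.1 (h ▸ List.mem_map_of_mem hx)
    have hrest0 : ∀ x ∈ t, x.1 ∉ acc := fun x hx => hacc x (List.mem_cons_of_mem _ hx)
    simp only [List.flatMap_cons, List.foldl_append, List.filter_cons]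
    by_cases h1 : c1 sn = true <;> by_cases h2 : c2 sn = true
    · simp only [h1, h2, if_true, Bool.true_or, List.foldl_cons, List.foldl_nil]
      rw [hadd acc hsn, hadd2, ih (acc ++ [sn.1]) hnd.2 hrest]
      simp
    · simp [h1, h2]
      rw [hadd acc hsn, ih (acc ++ [sn.1]) hnd.2 hrest]
      simp
    · simp [h1, h2]
      rw [hadd acc hsn, ih (acc ++ [sn.1]) hnd.2 hrest]
      simp
    · simp [h1, h2]
      exact ih acc hnd.2 hrest0

theorem extract_companies_eq (text : String) (company_list : List (String × String))
    (hnd : (company_list.map Prod.fst).Nodup) :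
    extract_companies_from_text text company_list = extract_companies_from_text_alt text company_list := by
  unfold extract_companies_from_text extract_companies_from_text_alt
  dsimp only
  set tl := (PySem.Str.lower text).toList with htl
  set found := pvFound tl (pvByFirst company_list) with hfound
  have hit_eq : ∀ p, p ∈ pvPats company_list → pvHit found p = PySem.Chars.isIn p tl := by
    intro p hp
    by_cases hpe : p = []
    · subst hpe
      have hnil : PySem.Chars.isIn [] tl = true := (PySem.Chars.isIn_iff_infix _ _).2 List.nil_infix
      simp [pvHit, hnil]
    · have hmemiff : p ∈ found ↔ PySem.Chars.isIn p tl = true := by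
        rw [hfound, pv_found_iff, PySem.Chars.isIn_iff_infix]
        exact ⟨fun h => h.2.2, fun h => ⟨hp, hpe, h⟩⟩
      have hb : (p == ([] : List Char)) = false := by simp [hpe]
      rw [pvHit, hb, Bool.false_or]
      by_cases hin : PySem.Chars.isIn p tl = true
      · rw [hin, PySem.Set.contains_iff]
        exact hmemiff.2 hin
      · have hcf : found.contains p = false := by
          rw [← Bool.not_eq_true, PySem.Set.contains_iff]
          exact fun hm => hin (hmemiff.1 hm)
        rw [hcf]
        exact (Bool.eq_false_iff.2 hin).symm
  have hA : ∀ sn : String × String,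
      PySem.Str.isIn (PySem.Str.lower sn.2) (PySem.Str.lower text) =
        PySem.Chars.isIn (PySem.Chars.lower sn.2.toList) tl := by
    intro sn; simp [PySem.Str.isIn_eq, htl]
  have hA2 : ∀ sn : String × String,
      PySem.Str.isIn (pvBase sn.1) (PySem.Str.lower text) =
        PySem.Chars.isIn (pvBase sn.1).toList tl := by
    intro sn; simp [PySem.Str.isIn_eq, htl]
  have hstepA : (fun (acc : List String) (sn : String × String) =>
      let acc := if PySem.Str.isIn (PySem.Str.lower sn.2) (PySem.Str.lower text) then acc ++ [sn.1] else acc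
      if PySem.Str.isIn (pvBase sn.1) (PySem.Str.lower text) then acc ++ [sn.1] else acc)
      = (fun (acc : List String) (sn : String × String) => acc ++
          ((if PySem.Chars.isIn (PySem.Chars.lower sn.2.toList) tl then [sn.1] else []) ++
           (if PySem.Chars.isIn (pvBase sn.1).toList tl then [sn.1] else []))) := by
    funext acc sn
    rw [hA sn, hA2 sn]
    dsimp only
    by_cases h1 : PySem.Chars.isIn (PySem.Chars.lower sn.2.toList) tl <;>
      by_cases h2 : PySem.Chars.isIn (pvBase sn.1).toList tl <;> simp [h1, h2]
  rw [hstepA, PySem.List.foldl_append_eq_flatMap, List.nil_append, PySem.Set.ofList_eq_foldl,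
    pv_ofList_blocks _ _ company_list [] hnd (by simp), List.nil_append,
    PySem.List.foldl_append_if
      (fun sn => pvHit found (PySem.Chars.lower sn.2.toList) || pvHit found (pvBase sn.1).toList)
      Prod.fst company_list [], List.nil_append]
  have hcond : ∀ sn ∈ company_list,
      (PySem.Chars.isIn (PySem.Chars.lower sn.2.toList) tl || PySem.Chars.isIn (pvBase sn.1).toList tl) =
      (pvHit found (PySem.Chars.lower sn.2.toList) || pvHit found (pvBase sn.1).toList) := by
    intro sn hsn
    have hp1 : PySem.Chars.lower sn.2.toList ∈ pvPats company_list := by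
      simp only [pvPats, List.mem_flatMap]
      exact ⟨sn, hsn, by simp⟩
    have hp2 : (pvBase sn.1).toList ∈ pvPats company_list := by
      simp only [pvPats, List.mem_flatMap]
      exact ⟨sn, hsn, by simp⟩
    rw [hit_eq _ hp1, hit_eq _ hp2]
  rw [List.filter_congr hcond]

-- ===== VERDICT (by name: the statement is the Claim_ definition above) =====
theorem extract_companies_from_text_spec : Claim_equal_extract_companies_from_text := by
  intro text cl _ hpre
  exact extract_companies_eq text cl hpre
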